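-- pv_equiv track=rewrite | github.com/weissab/barcode-processing | BarcodeCount_MM_clean.py | count_barcodes_v2
-- ===== SOURCE A (Python) =====
-- def count_barcodes_v2(barcodes, sequ_read, max_mismatch):
--     barcodes_count = {}
--     barcode_len = len(barcodes[0])
--     sequ_read_len = len(sequ_read)
--     # Initialize it so that the order is kept
--     for barcode in barcodes:
--         barcodes_count.setdefault(barcode, 0)
--     for i in range(sequ_read_len - barcode_len + 1):
--         for barcode in barcodes:
--             misatch_count = 0
--             for j in range(barcode_len):
--                 if sequ_read[i + j] != barcode[j]:
--                     misatch_count += 1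
--                 if misatch_count > max_mismatch:
--                     break
--             if misatch_count <= max_mismatch:
--                 barcodes_count[barcode] += 1
--     return barcodes_count
-- ===== SOURCE B (Python) =====
-- def _scan(b, sequ_read, L, max_mismatch):
--     # Streaming shift-add (bitap-style) pass: one left-to-right sweep over the
--     # read maintaining staggered partial Hamming distances D[j] of b[0..j]
--     # against the text ending at the current character; D[L-1] is the full
--     # distance of the window ending here.  No window extraction, no i+j
--     # re-indexing per window.
--     D = [0] * len(b)
--     hit = 0
--     for p, c in enumerate(sequ_read):
--         D = [(D[j - 1] if j else 0) + (b[j] != c) for j in range(len(b))]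
--         if p >= L - 1 and D[L - 1] <= max_mismatch:
--             hit += 1
--     return hit
--
-- def count_barcodes_v2(barcodes, sequ_read, max_mismatch):
--     L = len(barcodes[0])
--     mult = {}
--     for b in barcodes:
--         mult[b] = mult.get(b, 0) + 1
--     return {b: m * _scan(b, sequ_read, L, max_mismatch) for b, m in mult.items()}
-- ===== Notes on version B (the rewrite author's own statement) =====
-- stated objective: alternative
-- what changed: A slides every window and rescans each barcode OCCURRENCE character-by-character with a mutable count dict; B makes one bitap-style (shift-add) streaming pass over the read per DISTINCT barcode, maintaining a vector of staggered partial Hamming distances updated per read character (D[j] = distance of b[0..j] vs the text ending here) and tallying whenever the full-window slot is within the threshold, then emits multiplicity x hits per barcode; duplicate occurrences are never rescanned.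
-- outside the precondition, e.g. on count_barcodes_v2([''], 'a', 0): A returns {'': 2}, B raises IndexError; on count_barcodes_v2(['ab', 'x'], 'zz', 0): A returns {'ab': 0, 'x': 0}, B raises IndexError
import Mathlib
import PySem

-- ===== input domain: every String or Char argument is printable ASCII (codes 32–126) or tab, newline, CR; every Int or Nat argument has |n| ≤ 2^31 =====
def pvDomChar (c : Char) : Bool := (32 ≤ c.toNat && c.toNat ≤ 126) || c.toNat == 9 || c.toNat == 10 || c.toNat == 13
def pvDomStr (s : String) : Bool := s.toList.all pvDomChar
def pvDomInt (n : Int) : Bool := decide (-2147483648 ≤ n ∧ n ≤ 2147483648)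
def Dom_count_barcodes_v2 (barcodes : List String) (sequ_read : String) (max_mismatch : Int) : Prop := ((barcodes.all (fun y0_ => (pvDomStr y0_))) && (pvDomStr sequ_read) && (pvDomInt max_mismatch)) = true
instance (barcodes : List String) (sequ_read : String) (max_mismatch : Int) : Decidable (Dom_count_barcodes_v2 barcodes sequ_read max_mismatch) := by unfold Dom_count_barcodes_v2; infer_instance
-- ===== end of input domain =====

-- B replaces A's window-by-window rescans by one bitap-style (shift-add) streaming pass per
-- DISTINCT barcode: a vector of staggered partial Hamming distances is updated once per read
-- character and the full-window slot is tallied; a timing run measured B faster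
-- (duplicate occurrences are counted by multiplicity instead of rescanned).

-- ===== PORT A =====
-- the inner 'for j in range(barcode_len)' loop with its conditional increment and break
def pvMisLoop (read b : List Char) (i k : Int) : List Int → Int → Int
  | [], m => m
  | j :: js, m =>
    let m' := if PySem.List.pyGet? read (i + j) ≠ PySem.List.pyGet? b j then m + 1 else m
    if m' > k then m' else pvMisLoop read b i k js m'

def count_barcodes_v2 (barcodes : List String) (sequ_read : String) (max_mismatch : Int) : List (String × Int) :=
  -- barcodes[0] raises IndexError on an empty list (excluded by Pre_); '.getD ""' is never reached inside Pre_
  let barcode_len : Int := PySem.Str.len ((PySem.List.pyGet? barcodes 0).getD "")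
  let sequ_read_len : Int := PySem.Str.len sequ_read
  let d0 : PySem.Dict String Int := barcodes.foldl (fun d barcode => d.setdefault barcode 0) PySem.Dict.empty
  let d := (PySem.List.pyRange 0 (sequ_read_len - barcode_len + 1) 1).foldl (fun d i =>
    barcodes.foldl (fun d barcode =>
      let m := pvMisLoop sequ_read.toList barcode.toList i max_mismatch (PySem.List.pyRange 0 barcode_len 1) 0
      if m ≤ max_mismatch then d.insert barcode (d.getD barcode 0 + 1) else d) d) d0
  d.items

-- ===== PORT B =====
-- one step of the shift-add recurrence: D = [(D[j-1] if j else 0) + (b[j] != c) for j in range(len(b))]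
-- (both list indexings are always in range when executed, so '.getD 0' / pyGet? are exact)
def pvStepB (bl : List Char) (D : List Int) (c : Char) : List Int :=
  (List.range bl.length).map (fun (j : Nat) =>
    (if j ≠ 0 then (PySem.List.pyGet? D ((j : Int) - 1)).getD 0 else 0) +
    (if PySem.List.pyGet? bl (j : Int) ≠ some c then 1 else 0))

-- _scan: the single streaming pass 'for p, c in enumerate(sequ_read)' with state (D, hit)
def pvScanB (sequ : List Char) (L k : Int) (bl : List Char) : Int :=
  ((PySem.List.enumerate sequ 0).foldl
    (fun (st : List Int × Int) pc =>
      (pvStepB bl st.1 pc.2,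
        if pc.1 ≥ L - 1 ∧ (PySem.List.pyGet? (pvStepB bl st.1 pc.2) (L - 1)).getD 0 ≤ k
        then st.2 + 1 else st.2))
    (List.replicate bl.length 0, 0)).2

def count_barcodes_v2_alt (barcodes : List String) (sequ_read : String) (max_mismatch : Int) : List (String × Int) :=
  let L : Int := PySem.Str.len ((PySem.List.pyGet? barcodes 0).getD "")
  let mult : PySem.Dict String Int := barcodes.foldl (fun d b => d.insert b (d.getD b 0 + 1)) PySem.Dict.empty
  mult.items.map (fun p => (p.1, p.2 * pvScanB sequ_read.toList L max_mismatch p.1.toList))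

-- ===== PRECONDITION & SPEC =====
-- Pre_ excludes: the empty barcode list (A's barcodes[0] raises IndexError); an empty FIRST
-- barcode (zero-length windows: B's streaming DP has no slot to read, D[-1] raises IndexError);
-- and lists containing a barcode shorter than the first one when the read is long enough for the
-- j-loop to reach it (A indexes past that barcode's end and raises IndexError unless its early
-- break fires first, and B's D[L-1] read raises IndexError).
def Pre_count_barcodes_v2 (barcodes : List String) (sequ_read : String) (max_mismatch : Int) : Prop :=
  barcodes ≠ [] ∧ 1 ≤ (barcodes.headD "").toList.length ∧
    ((∀ b ∈ barcodes, (barcodes.headD "").toList.length ≤ b.toList.length) ∨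
      sequ_read.toList.length < (barcodes.headD "").toList.length)
instance (barcodes : List String) (sequ_read : String) (max_mismatch : Int) : Decidable (Pre_count_barcodes_v2 barcodes sequ_read max_mismatch) := by unfold Pre_count_barcodes_v2; infer_instance

def pvWitness_count_barcodes_v2 : List String × String × Int := (["AC", "AGT"], "ACGT", 1)

def Spec_count_barcodes_v2 (barcodes : List String) (sequ_read : String) (max_mismatch : Int) (out : List (String × Int)) : Prop := out = count_barcodes_v2_alt barcodes sequ_read max_mismatch
instance (barcodes : List String) (sequ_read : String) (max_mismatch : Int) (out : List (String × Int)) : Decidable (Spec_count_barcodes_v2 barcodes sequ_read max_mismatch out) := by unfold Spec_count_barcodes_v2; infer_instance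

-- ===== CLAIM (what is proved, stated in full; the proofs are below) =====
def Claim_equal_count_barcodes_v2 : Prop := ∀ (barcodes : List String) (sequ_read : String) (max_mismatch : Int), Dom_count_barcodes_v2 barcodes sequ_read max_mismatch → Pre_count_barcodes_v2 barcodes sequ_read max_mismatch → Spec_count_barcodes_v2 barcodes sequ_read max_mismatch (count_barcodes_v2 barcodes sequ_read max_mismatch)

-- ===== LEMMAS AND PROOFS =====

-- A's break loop decides 'full mismatch count ≤ k'
theorem pvMisLoop_le_iff (read b : List Char) (i k : Int) :
    ∀ (js : List Int) (m : Int),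
      (pvMisLoop read b i k js m ≤ k ↔
        m + ((js.countP (fun j => decide (PySem.List.pyGet? read (i + j) ≠ PySem.List.pyGet? b j))) : Int) ≤ k) := by
  intro js
  induction js with
  | nil => intro m; simp [pvMisLoop]
  | cons j js ih =>
    intro m
    have hc := Int.natCast_nonneg (js.countP (fun j => decide (PySem.List.pyGet? read (i + j) ≠ PySem.List.pyGet? b j)))
    rw [List.countP_cons]
    by_cases heq : PySem.List.pyGet? read (i + j) = PySem.List.pyGet? b j
    · have h1 : (if PySem.List.pyGet? read (i + j) ≠ PySem.List.pyGet? b j then m + 1 else m) = m :=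
        if_neg (by simp [heq])
      have h2 : (decide (PySem.List.pyGet? read (i + j) ≠ PySem.List.pyGet? b j)) = false := by
        simp [heq]
      simp only [pvMisLoop, h1, h2]
      by_cases hbr : m > k
      · rw [if_pos hbr]; push_cast; omega
      · rw [if_neg hbr, ih m]; push_cast; omega
    · have h1 : (if PySem.List.pyGet? read (i + j) ≠ PySem.List.pyGet? b j then m + 1 else m) = m + 1 :=
        if_pos heq
      have h2 : (decide (PySem.List.pyGet? read (i + j) ≠ PySem.List.pyGet? b j)) = true := by
        simp [heq]
      simp only [pvMisLoop, h1, h2]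
      by_cases hbr : m + 1 > k
      · rw [if_pos hbr]; push_cast; omega
      · rw [if_neg hbr, ih (m + 1)]; push_cast; omega

-- specification of the staggered counters: after p consumed characters, slot j holds the number
-- of mismatches of b[0..j] against the text ending at position p-1 (only consumed positions count)
def pvDspec (sequ bl : List Char) (p j : Nat) : Int :=
  (((List.range (j + 1)).countP (fun t => decide (j < t + p) && decide (bl[t]? ≠ sequ[p + t - 1 - j]?))) : Int)

-- full Hamming distance of the window ending at read position q against bl[0..Lnat-1]
def pvHamAt (sequ bl : List Char) (Lnat q : Nat) : Int :=
  (((List.range Lnat).countP (fun t => decide (bl[t]? ≠ sequ[q + 1 + t - Lnat]?))) : Int)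

theorem pvDspec_zero (sequ bl : List Char) (j : Nat) : pvDspec sequ bl 0 j = 0 := by
  unfold pvDspec
  have : (List.range (j + 1)).countP (fun t => decide (j < t + 0) && decide (bl[t]? ≠ sequ[0 + t - 1 - j]?)) = 0 := by
    rw [List.countP_eq_zero]
    intro t ht
    have htj : t < j + 1 := List.mem_range.mp ht
    have hng : ¬ (j < t + 0) := by omega
    simp only [Bool.and_eq_true, decide_eq_true_eq]
    rintro ⟨h1, -⟩
    omega
  rw [this]; rfl

theorem pvDspec_succ (sequ bl : List Char) (p j : Nat) (c : Char) (hc : sequ[p]? = some c) :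
    pvDspec sequ bl (p + 1) j =
      (if j = 0 then 0 else pvDspec sequ bl p (j - 1)) + (if bl[j]? ≠ some c then 1 else 0) := by
  unfold pvDspec
  rw [List.range_succ, List.countP_append]
  have hlast : (List.countP (fun t => decide (j < t + (p + 1)) && decide (bl[t]? ≠ sequ[p + 1 + t - 1 - j]?)) [j] : Int)
      = if bl[j]? ≠ some c then 1 else 0 := by
    have e : p + 1 + j - 1 - j = p := by omega
    rw [List.countP_cons, List.countP_nil, e, hc, decide_eq_true (show j < j + (p + 1) by omega)]
    by_cases hbc : bl[j]? ≠ some c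
    · simp [hbc]
    · simp [hbc]
  push_cast
  rw [hlast]
  by_cases hj0 : j = 0
  · subst hj0
    simp
  · rw [if_neg hj0]
    have hrest : List.countP (fun t => decide (j < t + (p + 1)) && decide (bl[t]? ≠ sequ[p + 1 + t - 1 - j]?)) (List.range j) =
        List.countP (fun t => decide (j - 1 < t + p) && decide (bl[t]? ≠ sequ[p + t - 1 - (j - 1)]?)) (List.range ((j - 1) + 1)) := by
      rw [show (j - 1) + 1 = j by omega]
      apply List.countP_congr
      intro t ht
      have htj := List.mem_range.mp ht
      by_cases hg : j ≤ t + p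
      · rw [show p + 1 + t - 1 - j = p + t - 1 - (j - 1) by omega,
          decide_eq_true (show j < t + (p + 1) by omega),
          decide_eq_true (show j - 1 < t + p by omega)]
      · rw [decide_eq_false (show ¬ (j < t + (p + 1)) by omega),
          decide_eq_false (show ¬ (j - 1 < t + p) by omega), Bool.false_and, Bool.false_and]
    rw [hrest]

theorem pvStep_spec (sequ bl : List Char) (p : Nat) (c : Char) (hc : sequ[p]? = some c) :
    pvStepB bl ((List.range bl.length).map (pvDspec sequ bl p)) c =
      (List.range bl.length).map (pvDspec sequ bl (p + 1)) := by
  unfold pvStepB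
  apply List.map_congr_left
  intro j hj
  have hjl : j < bl.length := List.mem_range.mp hj
  have hblj : PySem.List.pyGet? bl ((j : Nat) : Int) = bl[j]? := PySem.List.pyGet?_natCast bl j
  rw [pvDspec_succ sequ bl p j c hc, hblj]
  by_cases hj0 : j = 0
  · subst hj0
    simp
  · have hcast : ((j : Nat) : Int) - 1 = (((j - 1 : Nat)) : Int) := by omega
    have hDget : PySem.List.pyGet? ((List.range bl.length).map (pvDspec sequ bl p)) (((j - 1 : Nat)) : Int) =
        some (pvDspec sequ bl p (j - 1)) := by
      rw [PySem.List.pyGet?_natCast, List.getElem?_map]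
      have : (List.range bl.length)[j - 1]? = some (j - 1) := by
        rw [List.getElem?_range (by omega)]
      rw [this]; rfl
    rw [if_pos hj0, if_neg hj0, hcast, hDget]
    simp

theorem pvDspec_ham (sequ bl : List Char) (Lnat q : Nat) (hL1 : 1 ≤ Lnat) (hq : Lnat - 1 ≤ q) :
    pvDspec sequ bl (q + 1) (Lnat - 1) = pvHamAt sequ bl Lnat q := by
  unfold pvDspec pvHamAt
  have hr : (Lnat - 1) + 1 = Lnat := by omega
  rw [hr]
  congr 1
  apply List.countP_congr
  intro t ht
  have htL : t < Lnat := List.mem_range.mp ht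
  have hg : Lnat - 1 < t + (q + 1) := by omega
  have hidx : q + 1 + t - 1 - (Lnat - 1) = q + 1 + t - Lnat := by omega
  rw [hidx]
  simp [hg]

-- counting over [0,n) of a predicate guarded by 'm ≤ q' equals counting the shifted range
theorem pvShiftCount (m : Nat) (P : Nat → Bool) :
    ∀ (n : Nat), (List.range n).countP (fun q => decide (m ≤ q) && P (q - m)) =
      (List.range (n - m)).countP P := by
  intro n
  induction n with
  | zero => simp
  | succ n ih =>
    rw [List.range_succ, List.countP_append, ih, List.countP_cons, List.countP_nil]
    by_cases hm : m ≤ n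
    · have h1 : n + 1 - m = (n - m) + 1 := by omega
      rw [h1, List.range_succ, List.countP_append, List.countP_cons, List.countP_nil]
      simp [hm]
    · have h1 : n + 1 - m = n - m := by omega
      have h2 : ¬ (m ≤ n) := hm
      rw [h1]
      simp [h2]

-- loop invariant of the streaming pass: starting at position p with the correct counter vector,
-- the fold adds one hit per position q ≥ L-1 whose window Hamming distance is within k
theorem pvScanLoop (sequ bl : List Char) (Lnat : Nat) (k : Int) (hL1 : 1 ≤ Lnat)
    (hlen : Lnat ≤ bl.length ∨ sequ.length < Lnat) :
    ∀ (cs : List Char) (p : Nat) (hit : Int), sequ.drop p = cs →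
    ((PySem.List.enumerate cs ((p : Nat) : Int)).foldl
      (fun (st : List Int × Int) pc =>
        (pvStepB bl st.1 pc.2,
          if pc.1 ≥ ((Lnat : Nat) : Int) - 1 ∧ (PySem.List.pyGet? (pvStepB bl st.1 pc.2) (((Lnat : Nat) : Int) - 1)).getD 0 ≤ k
          then st.2 + 1 else st.2))
      ((List.range bl.length).map (pvDspec sequ bl p), hit)).2
    = hit + (((List.range' p cs.length).countP
        (fun q => decide (Lnat - 1 ≤ q) && decide (pvHamAt sequ bl Lnat q ≤ k))) : Int) := by
  intro cs
  induction cs with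
  | nil => intro p hit _; simp [PySem.List.enumerate_nil]
  | cons c cs ih =>
    intro p hit hdrop
    have hp : p < sequ.length := by
      by_contra h
      rw [List.drop_eq_nil_of_le (by omega)] at hdrop
      exact List.cons_ne_nil c cs hdrop.symm
    have hcp : sequ[p]? = some c := by
      have h0 : (sequ.drop p)[0]? = some c := by rw [hdrop]; rfl
      rw [List.getElem?_drop] at h0
      simpa using h0
    have hdrop' : sequ.drop (p + 1) = cs := by
      have h1 : (sequ.drop p).tail = cs := by rw [hdrop]; rfl
      rw [List.tail_drop] at h1
      exact h1
    rw [PySem.List.enumerate_cons, List.foldl_cons]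
    simp only [pvStep_spec sequ bl p c hcp]
    have hcast : ((p : Nat) : Int) + 1 = (((p + 1 : Nat)) : Int) := by push_cast; ring
    rw [hcast, ih (p + 1) _ hdrop']
    rw [List.length_cons, List.range'_succ, List.countP_cons]
    by_cases hguard : Lnat - 1 ≤ p
    · rcases hlen with hbl | hshort
      · have hLc : ((Lnat : Nat) : Int) - 1 = (((Lnat - 1 : Nat)) : Int) := by omega
        have hDget : PySem.List.pyGet? ((List.range bl.length).map (pvDspec sequ bl (p + 1))) (((Lnat - 1 : Nat)) : Int) =
            some (pvDspec sequ bl (p + 1) (Lnat - 1)) := by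
          rw [PySem.List.pyGet?_natCast, List.getElem?_map]
          have : (List.range bl.length)[Lnat - 1]? = some (Lnat - 1) := by
            rw [List.getElem?_range (by omega)]
          rw [this]; rfl
        have hham := pvDspec_ham sequ bl Lnat p hL1 hguard
        rw [hLc, hDget]
        simp only [Option.getD_some, hham]
        have hpge : ((p : Nat) : Int) ≥ (((Lnat - 1 : Nat)) : Int) := by omega
        by_cases hk : pvHamAt sequ bl Lnat p ≤ k
        · have htrue : (decide (Lnat - 1 ≤ p) && decide (pvHamAt sequ bl Lnat p ≤ k)) = true := by
            simp [hguard, hk]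
          rw [if_pos ⟨hpge, hk⟩, htrue]
          simp
          omega
        · have hfalse : (decide (Lnat - 1 ≤ p) && decide (pvHamAt sequ bl Lnat p ≤ k)) = false := by
            simp [hk]
          rw [if_neg (fun h => hk h.2), hfalse]
          simp
      · omega
    · have hpge : ¬ (((p : Nat) : Int) ≥ ((Lnat : Nat) : Int) - 1) := by omega
      have hfalse : (decide (Lnat - 1 ≤ p) && decide (pvHamAt sequ bl Lnat p ≤ k)) = false := by
        simp [hguard]
      rw [if_neg (fun h => hpge h.1), hfalse]
      simp

-- the streaming pass counts exactly the windows A's break loop accepts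
theorem pvScan_eq (sequ bl : List Char) (Lnat : Nat) (k : Int) (hL1 : 1 ≤ Lnat)
    (hlen : Lnat ≤ bl.length ∨ sequ.length < Lnat) :
    pvScanB sequ ((Lnat : Nat) : Int) k bl =
      (((PySem.List.pyRange 0 ((sequ.length : Int) - ((Lnat : Nat) : Int) + 1) 1).countP
        (fun i => decide (pvMisLoop sequ bl i k (PySem.List.pyRange 0 ((Lnat : Nat) : Int) 1) 0 ≤ k))) : Int) := by
  unfold pvScanB
  have hinit : (List.replicate bl.length (0 : Int)) = (List.range bl.length).map (pvDspec sequ bl 0) := by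
    symm
    rw [List.eq_replicate_iff]
    constructor
    · simp
    · intro x hx
      rw [List.mem_map] at hx
      obtain ⟨j, _, rfl⟩ := hx
      exact pvDspec_zero sequ bl j
  have hloop := pvScanLoop sequ bl Lnat k hL1 hlen sequ 0 0 (by simp)
  rw [Nat.cast_zero] at hloop
  rw [hinit, hloop, zero_add]
  -- shift the hit positions q = i + (Lnat - 1) to window starts i
  have hcongr : (List.range' 0 sequ.length).countP
        (fun q => decide (Lnat - 1 ≤ q) && decide (pvHamAt sequ bl Lnat q ≤ k)) =
      (List.range sequ.length).countP
        (fun q => decide (Lnat - 1 ≤ q) && decide (pvHamAt sequ bl Lnat ((q - (Lnat - 1)) + (Lnat - 1)) ≤ k)) := by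
    rw [← List.range_eq_range']
    apply List.countP_congr
    intro q _
    by_cases hg : Lnat - 1 ≤ q
    · have : (q - (Lnat - 1)) + (Lnat - 1) = q := by omega
      rw [this]
    · simp [hg]
  rw [hcongr,
    pvShiftCount (Lnat - 1) (fun i => decide (pvHamAt sequ bl Lnat (i + (Lnat - 1)) ≤ k)) sequ.length]
  -- A's side: window range as a Nat range (abstract the inner character range first)
  set js := PySem.List.pyRange 0 ((Lnat : Nat) : Int) 1 with hjs
  rw [PySem.List.pyRange_one, List.countP_map]
  have htoNat : ((sequ.length : Int) - ((Lnat : Nat) : Int) + 1 - 0).toNat = sequ.length - (Lnat - 1) := by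
    omega
  rw [htoNat]
  congr 1
  apply List.countP_congr
  intro i hi
  have hiw : i < sequ.length - (Lnat - 1) := List.mem_range.mp hi
  simp only [Function.comp_apply]
  -- both sides decide 'Hamming distance of window i ≤ k'
  have hmis : (pvMisLoop sequ bl ((0 : Int) + (i : Nat)) k js 0 ≤ k) ↔
      (pvHamAt sequ bl Lnat (i + (Lnat - 1)) ≤ k) := by
    rw [pvMisLoop_le_iff, zero_add]
    have hcnt : js.countP
          (fun j => decide (PySem.List.pyGet? sequ ((0 : Int) + (i : Nat) + j) ≠ PySem.List.pyGet? bl j)) =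
        (List.range Lnat).countP (fun t => decide (bl[t]? ≠ sequ[i + (Lnat - 1) + 1 + t - Lnat]?)) := by
      rw [hjs, PySem.List.pyRange_one, List.countP_map]
      have : ((((Lnat : Nat) : Int)) - 0).toNat = Lnat := by omega
      rw [this]
      apply List.countP_congr
      intro t ht
      have htL : t < Lnat := List.mem_range.mp ht
      simp only [Function.comp_apply]
      have e1 : PySem.List.pyGet? sequ ((0 : Int) + (i : Nat) + ((0 : Int) + (t : Nat))) = sequ[i + t]? := by
        have : ((0 : Int) + (i : Nat) + ((0 : Int) + (t : Nat))) = (((i + t : Nat)) : Int) := by push_cast; ring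
        rw [this, PySem.List.pyGet?_natCast]
      have e2 : PySem.List.pyGet? bl ((0 : Int) + (t : Nat)) = bl[t]? := by
        have : ((0 : Int) + (t : Nat)) = ((t : Nat) : Int) := by push_cast; ring
        rw [this, PySem.List.pyGet?_natCast]
      have e3 : i + (Lnat - 1) + 1 + t - Lnat = i + t := by omega
      rw [e1, e2, e3]
      rcases eq_or_ne (sequ[i + t]?) (bl[t]?) with h | h
      · simp [h]
      · simp [h, h.symm, Ne.symm]
    rw [hcnt]
    unfold pvHamAt
    omega
  rw [zero_add] at hmis
  rcases Decidable.em (pvHamAt sequ bl Lnat (i + (Lnat - 1)) ≤ k) with h | h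
  · simp [h, hmis.mpr h]
  · have hh : ¬ pvMisLoop sequ bl ((i : Nat) : Int) k js 0 ≤ k := fun hh => h (hmis.mp hh)
    simp [h]
    omega

-- the inner 'for barcode in barcodes' pass bumps every key by its matching occurrences
theorem pvInnerFold (P : String → Prop) [DecidablePred P] :
    ∀ (bs : List String) (d : PySem.Dict String Int), d.keys.Nodup →
      (∀ b ∈ bs, d.contains b = true) →
      (bs.foldl (fun d b => if P b then d.insert b (d.getD b 0 + 1) else d) d).items =
        d.items.map (fun q => (q.1, q.2 + (bs.count q.1 : Int) * (if P q.1 then 1 else 0))) := by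
  intro bs
  induction bs with
  | nil =>
    intro d hnd hcon
    simp
  | cons b bs ih =>
    intro d hnd hcon
    have hcb : d.contains b = true := hcon b (by simp)
    simp only [List.foldl_cons]
    by_cases hP : P b
    · rw [if_pos hP]
      set d' := d.insert b (d.getD b 0 + 1) with hd'
      have hitems : d'.items = d.items.map (fun q => if q.1 = b then (q.1, q.2 + 1) else q) := by
        rw [hd', PySem.Dict.items_insert_of_contains d _ hcb]
        apply List.map_congr_left
        intro q hq
        by_cases hqb : q.1 = b
        · have : d.getD b 0 = q.2 := by
            rw [← hqb]
            exact PySem.Dict.getD_of_mem_items d (by simpa using hq) hnd 0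
          simp [hqb, this]
        · simp [hqb]
      have hkeys : d'.keys = d.keys := PySem.Dict.keys_insert_of_contains d _ hcb
      have hnd' : d'.keys.Nodup := by rw [hkeys]; exact hnd
      have hcon' : ∀ x ∈ bs, d'.contains x = true := by
        intro x hx
        rw [hd', PySem.Dict.contains_insert]
        simp [hcon x (by simp [hx])]
      rw [ih d' hnd' hcon', hitems, List.map_map]
      apply List.map_congr_left
      intro q hq
      by_cases hqb : q.1 = b
      · simp only [Function.comp_apply, hqb, List.count_cons_self]
        simp [hP]
        ring
      · simp only [Function.comp_apply, if_neg hqb, List.count_cons, beq_iff_eq]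
        have : ¬ (b = q.1) := fun h => hqb h.symm
        simp [this]
    · rw [if_neg hP]
      rw [ih d hnd (fun x hx => hcon x (by simp [hx]))]
      apply List.map_congr_left
      intro q hq
      by_cases hqb : q.1 = b
      · simp [hqb, if_neg hP]
      · simp only [List.count_cons, beq_iff_eq]
        have : ¬ (b = q.1) := fun h => hqb h.symm
        simp [this]

-- the outer window loop accumulates the per-window indicators
theorem pvOuterFold (bs : List String) (P : Int → String → Prop) [∀ i b, Decidable (P i b)] :
    ∀ (W : List Int) (d : PySem.Dict String Int), d.keys.Nodup →
      (∀ b ∈ bs, d.contains b = true) →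
      (W.foldl (fun d i => bs.foldl (fun d b => if P i b then d.insert b (d.getD b 0 + 1) else d) d) d).items =
        d.items.map (fun q => (q.1, q.2 + (bs.count q.1 : Int) * ((W.countP (fun i => decide (P i q.1))) : Int))) := by
  intro W
  induction W with
  | nil =>
    intro d hnd hcon
    simp
  | cons i W ihW =>
    intro d hnd hcon
    simp only [List.foldl_cons]
    set d1 := bs.foldl (fun d b => if P i b then d.insert b (d.getD b 0 + 1) else d) d with hd1
    have hit1 : d1.items = d.items.map (fun q => (q.1, q.2 + (bs.count q.1 : Int) * (if P i q.1 then 1 else 0))) :=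
      pvInnerFold (P i) bs d hnd hcon
    have hkeys : d1.keys = d.keys := by
      show d1.items.map Prod.fst = d.items.map Prod.fst
      rw [hit1, List.map_map]
      rfl
    have hnd1 : d1.keys.Nodup := by rw [hkeys]; exact hnd
    have hcon1 : ∀ b ∈ bs, d1.contains b = true := by
      intro b hb
      rw [PySem.Dict.contains_eq_decide_mem_keys, hkeys, ← PySem.Dict.contains_eq_decide_mem_keys]
      exact hcon b hb
    rw [ihW d1 hnd1 hcon1, hit1, List.map_map]
    apply List.map_congr_left
    intro q hq
    simp only [Function.comp_apply, List.countP_cons]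
    congr 1
    push_cast
    by_cases hPi : P i q.1
    · simp [hPi]; ring
    · simp [hPi]

-- the setdefault initialisation builds the ordered-dedup dict with value 0
theorem pvSetdefaultFold :
    ∀ (bs s : List String), s.Nodup →
      ((bs.foldl (fun d b => d.setdefault b 0) (PySem.Dict.mk (s.map (fun x => (x, (0 : Int))))))).items =
        (PySem.Set.update s bs).map (fun x => (x, (0 : Int))) := by
  intro bs
  induction bs with
  | nil => intro s hs; simp [PySem.Set.update]
  | cons b bs ih =>
    intro s hs
    simp only [List.foldl_cons]
    have hup : PySem.Set.update s (b :: bs) = PySem.Set.update (PySem.Set.add s b) bs := by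
      simp [PySem.Set.update]
    by_cases hb : b ∈ s
    · have hcont : (PySem.Dict.mk (s.map (fun x => (x, (0 : Int))))).contains b = true := by
        rw [PySem.Dict.contains_mk]
        simp only [List.any_map]
        rw [List.any_eq_true]
        exact ⟨b, hb, by simp⟩
      rw [PySem.Dict.setdefault_of_contains _ _ hcont]
      rw [ih s hs, hup]
      have : PySem.Set.add s b = s := by simp [PySem.Set.add, PySem.Set.contains, hb]
      rw [this]
    · have hcont : (PySem.Dict.mk (s.map (fun x => (x, (0 : Int))))).contains b = false := by
        rw [PySem.Dict.contains_mk]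
        simp only [List.any_map]
        rw [List.any_eq_false]
        intro x hx
        simp only [Function.comp_apply, beq_iff_eq]
        intro h; exact hb (h ▸ hx)
      rw [PySem.Dict.setdefault_of_not_contains _ _ hcont]
      have hd : (PySem.Dict.mk (s.map (fun x => (x, (0 : Int))))).insert b 0 =
          PySem.Dict.mk ((s ++ [b]).map (fun x => (x, (0 : Int)))) := by
        apply PySem.Dict.ext
        rw [PySem.Dict.items_insert_of_not_contains _ _ hcont]
        simp
      have hnodup : (s ++ [b]).Nodup := by
        rw [List.nodup_append]
        refine ⟨hs, List.nodup_singleton b, ?_⟩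
        intro a ha b' hb'
        simp only [List.mem_singleton] at hb'
        exact fun h => hb ((hb' ▸ h) ▸ ha)
      rw [hd, ih (s ++ [b]) hnodup, hup]
      have : PySem.Set.add s b = s ++ [b] := by simp [PySem.Set.add, PySem.Set.contains, hb]
      rw [this]

-- ===== VERDICT (by name: the statement is the Claim_ definition above) =====
theorem count_barcodes_v2_spec : Claim_equal_count_barcodes_v2 := by
  intro barcodes sequ_read max_mismatch _hdom hpre
  obtain ⟨hne, hL1, hlen⟩ := hpre
  obtain ⟨h0, t, rfl⟩ := List.exists_cons_of_ne_nil hne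
  unfold Spec_count_barcodes_v2
  set bs : List String := h0 :: t with hbs
  set Lnat : Nat := h0.toList.length with hLdef
  have hL1' : 1 ≤ Lnat := by simpa [hbs, hLdef] using hL1
  have hget0 : ((PySem.List.pyGet? bs 0).getD "") = h0 := by
    rw [PySem.List.pyGet?_zero_cons]; rfl
  have hlen0 : PySem.Str.len ((PySem.List.pyGet? bs 0).getD "") = ((Lnat : Nat) : Int) := by
    rw [hget0, PySem.Str.len_eq]
  have hlenr : PySem.Str.len sequ_read = (sequ_read.toList.length : Int) := PySem.Str.len_eq _
  simp only [count_barcodes_v2, count_barcodes_v2_alt, hlen0, hlenr]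
  -- A's initial dict: ordered dedup with value 0
  have hd0 : (bs.foldl (fun d b => d.setdefault b 0) (PySem.Dict.empty : PySem.Dict String Int)).items =
      (PySem.Set.ofList bs).map (fun x => (x, (0 : Int))) := by
    have := pvSetdefaultFold bs [] List.nodup_nil
    simpa [PySem.Set.ofList_eq_foldl, PySem.Set.update] using this
  set d0 : PySem.Dict String Int := bs.foldl (fun d barcode => d.setdefault barcode 0) PySem.Dict.empty with hd0def
  have hkeys0 : d0.keys = PySem.Set.ofList bs := by
    show d0.items.map Prod.fst = _
    rw [hd0, List.map_map]
    exact List.map_id _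
  have hnd0 : d0.keys.Nodup := by rw [hkeys0]; exact PySem.Set.nodup_ofList bs
  have hcon0 : ∀ b ∈ bs, d0.contains b = true := by
    intro b hb
    rw [PySem.Dict.contains_eq_decide_mem_keys, hkeys0]
    simp [PySem.Set.mem_ofList, hb]
  rw [pvOuterFold bs
      (fun i b => pvMisLoop sequ_read.toList b.toList i max_mismatch (PySem.List.pyRange 0 ((Lnat : Nat) : Int) 1) 0 ≤ max_mismatch)
      (PySem.List.pyRange 0 ((sequ_read.toList.length : Int) - ((Lnat : Nat) : Int) + 1) 1) d0 hnd0 hcon0]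
  -- B's multiplicity dict is the counter
  rw [PySem.Dict.foldl_insert_getD_add_one_eq_counter, PySem.Dict.items_counter]
  rw [hd0, List.map_map, List.map_map]
  apply List.map_congr_left
  intro x hx
  simp only [Function.comp_apply]
  have hlenx : Lnat ≤ x.toList.length ∨ sequ_read.toList.length < Lnat := by
    rcases hlen with hall | hnL
    · left
      have := hall x (by rw [← PySem.Set.mem_ofList bs x]; exact hx)
      simpa [hbs, hLdef] using this
    · right
      simpa [hbs, hLdef] using hnL
  rw [pvScan_eq sequ_read.toList x.toList Lnat max_mismatch hL1' hlenx]
  push_cast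
  ring
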